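-- pv_equiv track=rewrite | github.com/dallyy/code-by-python | 数学相关模板/数学.py | multiply_sparse
-- ===== SOURCE A (Python) =====
-- def multiply_sparse(a, b):
--     """
--     稀疏多项式乘法优化版本
--     仅对非零项进行计算，适用于稀疏多项式
--     """
--     n = len(a)
--     m = len(b)
--     out_len = max(n, m)
--
--     nz_a = [(i, a[i] % mod) for i in range(n) if a[i] % mod != 0]
--     nz_b = [(j, b[j] % mod) for j in range(m) if b[j] % mod != 0]
--
--     res = [0] * out_len
--     for i, ai in nz_a:
--         for j, bj in nz_b:
--             k = i + j
--             if k >= out_len: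
--                 continue
--             res[k] = (res[k] + ai * bj) % mod
--     return res
--
-- mod = 998244353
-- ===== SOURCE B (Python) =====
-- mod = 998244353
--
-- def multiply_sparse(a, b):
--     """Truncated modular polynomial product, computed output-index first:
--     coefficient k is the single bounded convolution sum reduced once mod."""
--     n = len(a)
--     m = len(b)
--     return [sum(a[i] * b[k - i] for i in range(k + 1) if i < n and k - i < m) % mod
--             for k in range(max(n, m))]
-- ===== Notes on version B (the rewrite author's own statement) =====
-- stated objective: simpler
-- what changed: A scatters products of pre-filtered nonzero term pairs into a mutable result array; B computes each output coefficient k directly as one bounded convolution sum a[i]*b[k-i] reduced mod once, with no nonzero filtering and no in-place updates.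
import Mathlib
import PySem

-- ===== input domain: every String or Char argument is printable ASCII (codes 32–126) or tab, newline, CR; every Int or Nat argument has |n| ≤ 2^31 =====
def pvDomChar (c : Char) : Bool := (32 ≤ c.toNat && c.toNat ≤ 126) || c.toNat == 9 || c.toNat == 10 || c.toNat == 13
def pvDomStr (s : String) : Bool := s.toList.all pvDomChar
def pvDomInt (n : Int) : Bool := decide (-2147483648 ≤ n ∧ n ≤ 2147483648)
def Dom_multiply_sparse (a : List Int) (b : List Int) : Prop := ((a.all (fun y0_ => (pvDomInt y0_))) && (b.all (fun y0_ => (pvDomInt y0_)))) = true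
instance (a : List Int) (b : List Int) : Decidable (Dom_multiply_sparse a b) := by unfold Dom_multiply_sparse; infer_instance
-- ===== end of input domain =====

-- B computes each output coefficient directly as one bounded convolution sum (no nonzero
-- filtering, no in-place array updates); objective: simpler. Equivalence proved exactly.


-- the module constant `mod`
def pvMod : Int := 998244353

-- ===== PORT A =====
-- Literal port of A: build the nonzero-term lists of both polynomials, then scatter each
-- pair product into res (skipping indices ≥ out_len), reducing mod at every update.
-- a[i] for i in range(n) is always in range, so it is ported as getD i 0; `%` with the
-- positive literal modulus is PySem.Int.mod (Python-exact).
def multiply_sparse (a : List Int) (b : List Int) : List Int :=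
  let n := a.length
  let m := b.length
  let outLen := max n m
  let nzA := (List.range n).filterMap (fun i =>
    if PySem.Int.mod (a.getD i 0) pvMod ≠ 0 then some (i, PySem.Int.mod (a.getD i 0) pvMod) else none)
  let nzB := (List.range m).filterMap (fun j =>
    if PySem.Int.mod (b.getD j 0) pvMod ≠ 0 then some (j, PySem.Int.mod (b.getD j 0) pvMod) else none)
  nzA.foldl (fun res p =>
    nzB.foldl (fun res q =>
      let k := p.1 + q.1
      if outLen ≤ k then res
      else res.set k (PySem.Int.mod (res.getD k 0 + p.2 * q.2) pvMod)) res)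
    (List.replicate outLen 0)

-- ===== PORT B =====
-- Literal port of B: one comprehension over output indices; coefficient k is the bounded
-- convolution sum over i in range(k+1), reduced mod once.
def multiply_sparse_alt (a : List Int) (b : List Int) : List Int :=
  let n := a.length
  let m := b.length
  (List.range (max n m)).map (fun k =>
    PySem.Int.mod
      ((List.range (k + 1)).foldl (fun s i =>
        if i < n ∧ k - i < m then s + a.getD i 0 * b.getD (k - i) 0 else s) 0)
      pvMod)

-- ===== PRECONDITION & SPEC =====
def Spec_multiply_sparse (a : List Int) (b : List Int) (out : List Int) : Prop := out = multiply_sparse_alt a b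
instance (a : List Int) (b : List Int) (out : List Int) : Decidable (Spec_multiply_sparse a b out) := by unfold Spec_multiply_sparse; infer_instance

-- ===== CLAIM (what is proved, stated in full; the proofs are below) =====
def Claim_equal_multiply_sparse : Prop := ∀ (a : List Int) (b : List Int), Dom_multiply_sparse a b → Spec_multiply_sparse a b (multiply_sparse a b)

-- ===== LEMMAS AND PROOFS =====

def keySum : List (Nat × Int) → Nat → Int
  | [], _ => 0
  | p :: P, k => (if p.1 = k then p.2 else 0) + keySum P k

def rsum (n : Nat) (f : Nat → Int) : Int := ((List.range n).map f).sum

theorem rsum_succ (n : Nat) (f : Nat → Int) : rsum (n + 1) f = rsum n f + f n := by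
  simp [rsum, List.range_succ]

theorem keySum_append (P Q : List (Nat × Int)) (k : Nat) :
    keySum (P ++ Q) k = keySum P k + keySum Q k := by
  induction P with
  | nil => simp [keySum]
  | cons p P ih => simp [keySum, ih]; ring

theorem keySum_flatMap {α : Type} (L : List α) (g : α → List (Nat × Int)) (k : Nat) :
    keySum (L.flatMap g) k = (L.map (fun p => keySum (g p) k)).sum := by
  induction L with
  | nil => simp [keySum]
  | cons p L ih => simp [List.flatMap_cons, keySum_append, ih]

theorem sum_filterMap (l : List Nat) (v : Nat → Int) (F : Nat → Int → Int)
    (hF : ∀ i, F i 0 = 0) :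
    ((l.filterMap (fun i => if v i = 0 then none else some (i, v i))).map
        (fun p => F p.1 p.2)).sum
      = (l.map (fun i => F i (v i))).sum := by
  induction l with
  | nil => simp
  | cons i l ih =>
    by_cases h : v i = 0
    · simp [h, ih, hF]
    · simp [h, ih]

theorem pick (i k : Nat) (c : Nat → Int) (m : Nat) :
    rsum m (fun j => if i + j = k then c j else 0)
      = if i ≤ k ∧ k - i < m then c (k - i) else 0 := by
  induction m with
  | zero => simp [rsum]
  | succ m ih =>
    rw [rsum_succ, ih]
    by_cases h2 : i + m = k
    · have hki : k - i = m := by omega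
      rw [if_neg (by omega : ¬ (i ≤ k ∧ k - i < m)), if_pos h2,
        if_pos (by omega : i ≤ k ∧ k - i < m + 1), hki, zero_add]
    · rw [if_neg h2, add_zero]
      by_cases h1 : i ≤ k ∧ k - i < m
      · rw [if_pos h1, if_pos (by omega)]
      · rw [if_neg h1, if_neg (by omega)]

theorem rsum_congr {n : Nat} {f g : Nat → Int} (h : ∀ i, i < n → f i = g i) :
    rsum n f = rsum n g := by
  induction n with
  | zero => simp [rsum]
  | succ n ih =>
    rw [rsum_succ, rsum_succ, ih (fun i hi => h i (by omega)), h n (by omega)]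

theorem rsum_extend {f : Nat → Int} {n N : Nat} (hnN : n ≤ N)
    (h : ∀ i, n ≤ i → f i = 0) : rsum N f = rsum n f := by
  induction N, hnN using Nat.le_induction with
  | base => rfl
  | succ N hN ih => rw [rsum_succ, ih, h N hN, add_zero]

theorem rsum_emod {n : Nat} {f g : Nat → Int}
    (h : ∀ i, i < n → f i % pvMod = g i % pvMod) :
    rsum n f % pvMod = rsum n g % pvMod := by
  induction n with
  | zero => simp [rsum]
  | succ n ih =>
    rw [rsum_succ, rsum_succ]
    exact Int.ModEq.add (ih (fun i hi => h i (by omega))) (h n (by omega))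

theorem foldl_nest (N : Nat) (L1 L2 : List (Nat × Int)) (init : List Int) :
    L1.foldl (fun res p => L2.foldl (fun res q =>
        if N ≤ p.1 + q.1 then res
        else res.set (p.1 + q.1) ((res.getD (p.1 + q.1) 0 + p.2 * q.2) % pvMod)) res) init
      = (L1.flatMap (fun p => L2.map (fun q => (p.1 + q.1, p.2 * q.2)))).foldl
          (fun res r => if N ≤ r.1 then res
            else res.set r.1 ((res.getD r.1 0 + r.2) % pvMod)) init := by
  induction L1 generalizing init with
  | nil => simp
  | cons p L1 ih =>
    simp only [List.flatMap_cons, List.foldl_cons, List.foldl_append, List.foldl_map]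
    exact ih _

theorem fold_upd (outLen : Nat) (P : List (Nat × Int)) (res : List Int) (h : Nat → Int)
    (hlen : res.length = outLen)
    (hres : ∀ k, k < outLen → res.getD k 0 = h k % pvMod) :
    (P.foldl (fun res r => if outLen ≤ r.1 then res
        else res.set r.1 ((res.getD r.1 0 + r.2) % pvMod)) res).length = outLen ∧
    ∀ k, k < outLen →
      (P.foldl (fun res r => if outLen ≤ r.1 then res
        else res.set r.1 ((res.getD r.1 0 + r.2) % pvMod)) res).getD k 0
        = (h k + keySum P k) % pvMod := by
  induction P generalizing res h with
  | nil => exact ⟨hlen, fun k hk => by simpa [keySum] using hres k hk⟩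
  | cons p P ih =>
    rw [List.foldl_cons]
    by_cases hp : outLen ≤ p.1
    · rw [if_pos hp]
      obtain ⟨hl, hv⟩ := ih res h hlen hres
      refine ⟨hl, fun k hk => ?_⟩
      rw [hv k hk]
      have hne : p.1 ≠ k := by omega
      simp [keySum, hne]
    · rw [if_neg hp]
      have hp' : p.1 < outLen := by omega
      have hinv : ∀ k, k < outLen →
          (res.set p.1 ((res.getD p.1 0 + p.2) % pvMod)).getD k 0
            = (h k + (if p.1 = k then p.2 else 0)) % pvMod := by
        intro k hk
        have hklen : k < (res.set p.1 ((res.getD p.1 0 + p.2) % pvMod)).length := by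
          simp [hlen]; omega
        rw [List.getD_eq_getElem _ _ hklen]
        simp only [List.getElem_set]
        by_cases hkp : p.1 = k
        · subst hkp
          rw [if_pos rfl, if_pos rfl, hres p.1 hk, Int.emod_add_emod]
        · rw [if_neg hkp, if_neg hkp, add_zero,
            ← List.getD_eq_getElem _ 0 (by simp [hlen]; omega : k < res.length), hres k hk]
      obtain ⟨hl, hv⟩ := ih (res.set p.1 ((res.getD p.1 0 + p.2) % pvMod))
        (fun k => h k + (if p.1 = k then p.2 else 0)) (by simpa using hlen) hinv
      refine ⟨hl, fun k hk => ?_⟩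
      rw [hv k hk, keySum]
      ring_nf

theorem pvMod_pos : (0:Int) < pvMod := by norm_num [pvMod]

theorem keySum_map' {α : Type} (l : List α) (g : α → Nat) (w : α → Int) (k : Nat) :
    keySum (l.map (fun x => (g x, w x))) k
      = (l.map (fun x => if g x = k then w x else 0)).sum := by
  induction l with
  | nil => simp [keySum]
  | cons x l ih => simp [keySum, ih]

theorem keySum_pairs (n m : Nat) (va vb : Nat → Int) (k : Nat) :
    keySum (((List.range n).filterMap (fun i => if va i = 0 then none else some (i, va i))).flatMap
        (fun p => ((List.range m).filterMap (fun j => if vb j = 0 then none else some (j, vb j))).map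
          (fun q => (p.1 + q.1, p.2 * q.2)))) k
      = rsum n (fun i => if i ≤ k ∧ k - i < m then va i * vb (k - i) else 0) := by
  rw [keySum_flatMap]
  have inner : ∀ (i : Nat) (ai : Int),
      keySum (((List.range m).filterMap (fun j => if vb j = 0 then none else some (j, vb j))).map
        (fun q => (i + q.1, ai * q.2))) k
      = if i ≤ k ∧ k - i < m then ai * vb (k - i) else 0 := by
    intro i ai
    rw [keySum_map' _ (fun (q : Nat × Int) => i + q.1) (fun (q : Nat × Int) => ai * q.2)]
    rw [sum_filterMap (List.range m) vb (fun j x => if i + j = k then ai * x else 0)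
      (by intro j; simp)]
    simpa [rsum] using pick i k (fun j => ai * vb j) m
  simp only [inner]
  rw [sum_filterMap (List.range n) va
    (fun i x => if i ≤ k ∧ k - i < m then x * vb (k - i) else 0) (by intro i; simp)]
  simp only [rsum]

theorem A_char (a b : List Int) :
    (multiply_sparse a b).length = max a.length b.length ∧
    ∀ k, k < max a.length b.length →
      (multiply_sparse a b).getD k 0 =
        (rsum a.length (fun i => if i ≤ k ∧ k - i < b.length
            then (a.getD i 0 % pvMod) * (b.getD (k - i) 0 % pvMod) else 0)) % pvMod := by
  have hrw : multiply_sparse a b =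
      ((((List.range a.length).filterMap (fun i =>
          if (a.getD i 0) % pvMod = 0 then none else some (i, (a.getD i 0) % pvMod))).flatMap
        (fun p => ((List.range b.length).filterMap (fun j =>
          if (b.getD j 0) % pvMod = 0 then none else some (j, (b.getD j 0) % pvMod))).map
          (fun q => (p.1 + q.1, p.2 * q.2)))).foldl
        (fun res r => if max a.length b.length ≤ r.1 then res
          else res.set r.1 ((res.getD r.1 0 + r.2) % pvMod))
        (List.replicate (max a.length b.length) 0)) := by
    simp only [multiply_sparse, PySem.Int.mod_eq_emod_of_pos pvMod_pos, ne_eq, ite_not]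
    rw [foldl_nest]
  obtain ⟨hl, hv⟩ := fold_upd (max a.length b.length) _
    (List.replicate (max a.length b.length) (0:Int)) (fun _ => 0)
    (by simp) (by intro k hk; simp)
  rw [hrw]
  refine ⟨hl, fun k hk => ?_⟩
  rw [hv k hk, keySum_pairs, zero_add]

theorem B_char (a b : List Int) :
    (multiply_sparse_alt a b).length = max a.length b.length ∧
    ∀ k, k < max a.length b.length →
      (multiply_sparse_alt a b).getD k 0 =
        (rsum (k + 1) (fun i => if i < a.length ∧ k - i < b.length
            then a.getD i 0 * b.getD (k - i) 0 else 0)) % pvMod := by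
  constructor
  · simp [multiply_sparse_alt]
  · intro k hk
    simp only [multiply_sparse_alt, PySem.Int.mod_eq_emod_of_pos pvMod_pos]
    rw [List.getD_eq_getElem _ _ (by simpa using hk), List.getElem_map, List.getElem_range]
    congr 1
    have hstep : (fun (s : Int) (i : Nat) =>
          if i < a.length ∧ k - i < b.length then s + a.getD i 0 * b.getD (k - i) 0 else s)
        = fun s i => s + (if i < a.length ∧ k - i < b.length
            then a.getD i 0 * b.getD (k - i) 0 else 0) := by
      funext s i; split <;> simp
    rw [hstep, PySem.List.foldl_add]
    simp [rsum]

theorem eq_main (a b : List Int) : multiply_sparse a b = multiply_sparse_alt a b := by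
  obtain ⟨hlA, hvA⟩ := A_char a b
  obtain ⟨hlB, hvB⟩ := B_char a b
  apply List.ext_getElem (by rw [hlA, hlB])
  intro k h1 h2
  have hk : k < max a.length b.length := by rwa [hlA] at h1
  rw [← List.getD_eq_getElem _ 0 h1, ← List.getD_eq_getElem _ 0 h2, hvA k hk, hvB k hk]
  have hA2 : rsum a.length (fun i => if i ≤ k ∧ k - i < b.length
        then (a.getD i 0 % pvMod) * (b.getD (k - i) 0 % pvMod) else 0) % pvMod
      = rsum a.length (fun i => if i < a.length ∧ i ≤ k ∧ k - i < b.length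
        then a.getD i 0 * b.getD (k - i) 0 else 0) % pvMod := by
    apply rsum_emod
    intro i hi
    by_cases hc : i ≤ k ∧ k - i < b.length
    · rw [if_pos hc, if_pos ⟨hi, hc.1, hc.2⟩, ← Int.mul_emod]
    · rw [if_neg hc, if_neg (by tauto)]
  have hB2 : rsum (k + 1) (fun i => if i < a.length ∧ k - i < b.length
        then a.getD i 0 * b.getD (k - i) 0 else 0)
      = rsum (k + 1) (fun i => if i < a.length ∧ i ≤ k ∧ k - i < b.length
        then a.getD i 0 * b.getD (k - i) 0 else 0) := by
    apply rsum_congr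
    intro i hi
    by_cases hc : i < a.length ∧ k - i < b.length
    · rw [if_pos hc, if_pos ⟨hc.1, by omega, hc.2⟩]
    · rw [if_neg hc, if_neg (by tauto)]
  have hext1 : rsum (max a.length (k + 1)) (fun i => if i < a.length ∧ i ≤ k ∧ k - i < b.length
        then a.getD i 0 * b.getD (k - i) 0 else 0) = rsum a.length _ :=
    rsum_extend (le_max_left _ _) (fun i hi => by rw [if_neg (by omega)])
  have hext2 : rsum (max a.length (k + 1)) (fun i => if i < a.length ∧ i ≤ k ∧ k - i < b.length
        then a.getD i 0 * b.getD (k - i) 0 else 0) = rsum (k + 1) _ :=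
    rsum_extend (le_max_right _ _) (fun i hi => by rw [if_neg (by omega)])
  rw [hA2, hB2, ← hext1, hext2]

-- ===== VERDICT (by name: the statement is the Claim_ definition above) =====
theorem multiply_sparse_spec : Claim_equal_multiply_sparse := by
  intro a b _
  unfold Spec_multiply_sparse
  exact eq_main a b
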